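-- pv_equiv track=rewrite | github.com/seanlab3/algorithms3 | arrays/friends_of_ages.py | friends_of_ages
-- ===== SOURCE A (Python) =====
-- def friends_of_ages(ages) -> int:
--     count = [0] * 121
--
--     for age in ages:
--         count[age] += 1
--
--     requests = 0
--     for age_A, count_A in enumerate(count):
--         for age_B, count_B in enumerate(count):
--             if age_B <= 0.5 * age_A + 7: continue
--             if age_B > age_A: continue
--             if age_B > 100 and age_A < 100: continue
--             requests += count_A * count_B
--             if age_A == age_B: requests -= count_A
--
--     return requests
-- ===== SOURCE B (Python) =====
-- def friends_of_ages(ages) -> int: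
--     cnt = [0] * 121
--     for age in ages:
--         cnt[age] += 1
--     prefix = [0]
--     run = 0
--     for c in cnt:
--         run += c
--         prefix.append(run)
--     total = 0
--     for a in range(15, 121):
--         if cnt[a]:
--             window = prefix[a + 1] - prefix[(a + 14) // 2 + 1]
--             total += cnt[a] * (window - 1)
--     return total
-- ===== Notes on version B (the rewrite author's own statement) =====
-- stated objective: faster
-- what changed: Replaces A's 121x121 nested scan over age pairs with a single prefix-sum array over the age buckets, so each age's valid friend window (age/2+7, age] is summed in O(1) and only ages 15..120 are visited.
import Mathlib
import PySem

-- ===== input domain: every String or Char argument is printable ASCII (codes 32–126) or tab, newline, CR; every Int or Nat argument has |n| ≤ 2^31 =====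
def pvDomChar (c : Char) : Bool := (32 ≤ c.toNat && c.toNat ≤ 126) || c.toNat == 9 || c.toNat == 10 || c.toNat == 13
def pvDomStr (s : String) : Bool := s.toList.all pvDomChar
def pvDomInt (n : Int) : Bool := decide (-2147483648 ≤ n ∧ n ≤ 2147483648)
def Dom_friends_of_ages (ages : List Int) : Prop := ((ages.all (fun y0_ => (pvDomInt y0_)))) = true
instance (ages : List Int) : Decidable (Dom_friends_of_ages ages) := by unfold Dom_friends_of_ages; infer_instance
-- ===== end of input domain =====

-- B replaces A's 121x121 nested bucket scan by a prefix-sum array over the age buckets, reading each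
-- age's friend window in one subtraction; objective: faster (the quadratic bucket pass disappears).

-- ===== PORT A =====
-- count[age] += 1  (Python list indexing: in-range negative indices wrap; out of range raises — excluded by Pre_)
def pvCountStep (c : List Int) (age : Int) : List Int :=
  PySem.List.pySetD c age (PySem.List.pyGetD c age 0 + 1)

-- count = [0]*121; for age in ages: count[age] += 1   (these lines are textually identical in A and in B)
def pvCount (ages : List Int) : List Int :=
  ages.foldl pvCountStep (List.replicate 121 0)

def friends_of_ages (ages : List Int) : Int :=
  let count := pvCount ages
  (PySem.List.enumerate count 0).foldl (fun requests pA =>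
    (PySem.List.enumerate count 0).foldl (fun requests pB =>
      -- 'age_B <= 0.5 * age_A + 7': the indices are ints 0..120 and 0.5*age_A+7 is an exact dyadic
      -- float, so the test is exactly the integer comparison 2*age_B <= age_A + 14
      if 2 * pB.1 ≤ pA.1 + 14 then requests
      else if pB.1 > pA.1 then requests
      else if pB.1 > 100 ∧ pA.1 < 100 then requests
      else
        let requests := requests + pA.2 * pB.2
        if pA.1 = pB.1 then requests - pA.2 else requests)
      requests) 0

-- ===== PORT B =====
-- prefix = [0]; run = 0; for c in cnt: run += c; prefix.append(run)
def pvPrefixRun (cnt : List Int) : Int × List Int :=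
  cnt.foldl (fun (s : Int × List Int) c => (s.1 + c, s.2 ++ [s.1 + c])) (0, [0])

def friends_of_ages_alt (ages : List Int) : Int :=
  let cnt := pvCount ages
  let pr := pvPrefixRun cnt
  -- for a in range(15, 121): if cnt[a]: window = prefix[a+1] - prefix[(a+14)//2 + 1]; total += cnt[a]*(window-1)
  (PySem.List.pyRange 15 121 1).foldl (fun total a =>
    if PySem.List.pyGetD cnt a 0 ≠ 0 then
      let window := PySem.List.pyGetD pr.2 (a + 1) 0
        - PySem.List.pyGetD pr.2 (PySem.Int.floordiv (a + 14) 2 + 1) 0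
      total + PySem.List.pyGetD cnt a 0 * (window - 1)
    else total) 0

-- ===== PRECONDITION & SPEC =====
-- Pre_ excludes exactly the inputs where Python A raises IndexError: an age outside -121..120
-- (count has length 121; in-range negative ages wrap in Python, and A and B handle them alike).
def Pre_friends_of_ages (ages : List Int) : Prop :=
  ∀ age ∈ ages, PySem.Raise.InRange 121 age
instance (ages : List Int) : Decidable (Pre_friends_of_ages ages) := by
  unfold Pre_friends_of_ages; infer_instance

def pvWitness_friends_of_ages : List Int := [16, 16, 17, 120, 0, -1]

def Spec_friends_of_ages (ages : List Int) (out : Int) : Prop := out = friends_of_ages_alt ages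
instance (ages : List Int) (out : Int) : Decidable (Spec_friends_of_ages ages out) := by
  unfold Spec_friends_of_ages; infer_instance

-- ===== CLAIM (what is proved, stated in full; the proofs are below) =====
def Claim_equal_friends_of_ages : Prop := ∀ (ages : List Int), Dom_friends_of_ages ages → Pre_friends_of_ages ages → Spec_friends_of_ages ages (friends_of_ages ages)

-- ===== LEMMAS AND PROOFS =====

-- pvS cnt j = sum of the first j buckets; pvG is the common per-age contribution of both loops
def pvS (cnt : List Int) (j : Nat) : Int := (cnt.take j).sum

def pvG (cnt : List Int) (a : Int) (ca : Int) : Int :=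
  if 15 ≤ a then
    ca * (pvS cnt (a + 1).toNat - pvS cnt (PySem.Int.floordiv (a + 14) 2 + 1).toNat - 1)
  else 0

lemma pv_enum_interval_sum (l : List Int) :
    ∀ (s lo hi : Int), lo ≤ hi + 1 →
    ((PySem.List.enumerate l s).map (fun q => if lo ≤ q.1 ∧ q.1 ≤ hi then q.2 else 0)).sum
      = (l.take (hi + 1 - s).toNat).sum - (l.take (lo - s).toNat).sum := by
  induction l with
  | nil => intro s lo hi _; simp [PySem.List.enumerate]
  | cons x xs ih =>
    intro s lo hi hlh
    rw [PySem.List.enumerate_cons]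
    simp only [List.map_cons, List.sum_cons]
    rw [ih (s+1) lo hi hlh]
    by_cases hls : lo ≤ s
    · by_cases hsh : s ≤ hi
      · rw [if_pos ⟨hls, hsh⟩]
        have h1 : (hi + 1 - s).toNat = (hi + 1 - (s+1)).toNat + 1 := by omega
        have h2 : (lo - s).toNat = 0 := by omega
        have h3 : (lo - (s+1)).toNat = 0 := by omega
        rw [h1, h2, h3, List.take_succ_cons, List.take_zero, List.take_zero]
        simp
      · rw [if_neg (by omega)]
        have h1 : (hi + 1 - s).toNat = 0 := by omega
        have h2 : (lo - s).toNat = 0 := by omega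
        have h3 : (hi + 1 - (s+1)).toNat = 0 := by omega
        have h4 : (lo - (s+1)).toNat = 0 := by omega
        rw [h1, h2, h3, h4]
        simp
    · rw [if_neg (by omega)]
      have h1 : (hi + 1 - s).toNat = (hi + 1 - (s+1)).toNat + 1 := by omega
      have h2 : (lo - s).toNat = (lo - (s+1)).toNat + 1 := by omega
      rw [h1, h2, List.take_succ_cons, List.take_succ_cons]
      simp

lemma pv_enum_point_sum (l : List Int) (k : Int) :
    ∀ (s a : Int),
    ((PySem.List.enumerate l s).map (fun q => if q.1 = a then k else 0)).sum
      = if s ≤ a ∧ a < s + l.length then k else 0 := by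
  induction l with
  | nil => intro s a; simp [PySem.List.enumerate]
  | cons x xs ih =>
    intro s a
    rw [PySem.List.enumerate_cons]
    simp only [List.map_cons, List.sum_cons, List.length_cons]
    rw [ih (s+1) a]
    by_cases hsa : s = a
    · rw [if_pos hsa, if_neg (by omega), if_pos (by simp; omega)]
      ring
    · rw [if_neg hsa]
      by_cases h2 : s + 1 ≤ a ∧ a < s + 1 + xs.length
      · rw [if_pos h2, if_pos (by push_cast at h2 ⊢; omega)]; ring
      · rw [if_neg h2, if_neg (by push_cast at h2 ⊢; omega)]; ring

lemma pv_enum_sum_eq_range (G : Int → Int → Int) (l : List Int) :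
    ∀ (s : Int),
    ((PySem.List.enumerate l s).map (fun p => G p.1 p.2)).sum
      = ((PySem.List.pyRange s (s + l.length) 1).map
          (fun a => G a (PySem.List.pyGetD l (a - s) 0))).sum := by
  induction l with
  | nil =>
    intro s
    rw [show s + ((([] : List Int).length : Nat) : Int) = s by simp]
    rw [PySem.List.pyRange_one_eq_nil (le_refl s)]
    simp [PySem.List.enumerate]
  | cons x xs ih =>
    intro s
    rw [PySem.List.enumerate_cons]
    have hcons : s < s + (((x :: xs).length : Nat) : Int) := by
      simp only [List.length_cons]; push_cast; omega
    rw [PySem.List.pyRange_one_cons hcons]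
    simp only [List.map_cons, List.sum_cons]
    rw [ih (s+1)]
    congr 1
    · simp [PySem.List.pyGetD_zero_cons]
    · have hb : s + (((x :: xs).length : Nat) : Int) = (s+1) + (xs.length : Int) := by
        simp only [List.length_cons]; push_cast; omega
      rw [hb]
      congr 1
      apply List.map_congr_left
      intro a ha
      rw [PySem.List.mem_pyRange_one] at ha
      have h1 : PySem.List.pyGetD (x :: xs) (a - s) 0 = PySem.List.pyGetD xs (a - (s+1)) 0 := by
        rw [PySem.List.pyGetD_of_nonneg _ _ (by omega), PySem.List.pyGetD_of_nonneg _ _ (by omega)]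
        have : (a - s).toNat = (a - (s+1)).toNat + 1 := by omega
        rw [this, List.getD_cons_succ]
      rw [h1]

lemma pv_prefix_spec (l : List Int) :
    ∀ (r : Int) (p : List Int),
    (l.foldl (fun (s : Int × List Int) c => (s.1 + c, s.2 ++ [s.1 + c])) (r, p))
      = (r + l.sum, p ++ (List.range l.length).map (fun i => r + (l.take (i + 1)).sum)) := by
  induction l with
  | nil => intro r p; simp
  | cons x xs ih =>
    intro r p
    simp only [List.foldl_cons]
    rw [ih (r + x) (p ++ [r + x])]
    refine Prod.ext ?_ ?_
    · simp; ring
    · simp only [List.length_cons, List.range_succ_eq_map, List.map_cons, List.map_map]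
      simp [Function.comp, List.take_succ_cons, List.append_assoc]
      intro i _; ring

lemma pv_count_length (ages : List Int) : (pvCount ages).length = 121 := by
  suffices h : ∀ c : List Int, c.length = 121 → (ages.foldl pvCountStep c).length = 121 by
    exact h _ (by simp)
  induction ages with
  | nil => intro c hc; simpa using hc
  | cons a t ih =>
    intro c hc
    simp only [List.foldl_cons]
    exact ih _ (by rw [pvCountStep, PySem.List.length_pySetD]; exact hc)

lemma pv_prefix_getD (cnt : List Int) (h : cnt.length = 121) (j : Int)
    (h0 : 0 ≤ j) (h1 : j ≤ 121) :
    PySem.List.pyGetD (pvPrefixRun cnt).2 j 0 = pvS cnt j.toNat := by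
  rw [pvPrefixRun, pv_prefix_spec cnt 0 [0]]
  simp only [List.singleton_append, zero_add]
  rw [PySem.List.pyGetD_of_nonneg _ _ h0]
  rcases hk : j.toNat with _ | k
  · simp [pvS]
  · rw [List.getD_cons_succ]
    rw [h, PySem.List.getD_map_range _ _ _ _ (by omega)]
    simp [pvS]

lemma pv_sum_map_sub {α : Type} (l : List α) (f g : α → Int) :
    (l.map (fun x => f x - g x)).sum = (l.map f).sum - (l.map g).sum := by
  induction l with
  | nil => simp
  | cons x t ih => simp [ih]; ring

lemma pv_A_loop (cnt : List Int) (h : cnt.length = 121) :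
    (PySem.List.enumerate cnt 0).foldl (fun requests pA =>
      (PySem.List.enumerate cnt 0).foldl (fun requests pB =>
        if 2 * pB.1 ≤ pA.1 + 14 then requests
        else if pB.1 > pA.1 then requests
        else if pB.1 > 100 ∧ pA.1 < 100 then requests
        else
          let requests := requests + pA.2 * pB.2
          if pA.1 = pB.1 then requests - pA.2 else requests)
        requests) 0
    = ((PySem.List.pyRange 0 121 1).map
        (fun a => pvG cnt a (PySem.List.pyGetD cnt a 0))).sum := by
  have hbody : ∀ (pA : Int × Int) (requests : Int),
      (PySem.List.enumerate cnt 0).foldl (fun requests pB =>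
        if 2 * pB.1 ≤ pA.1 + 14 then requests
        else if pB.1 > pA.1 then requests
        else if pB.1 > 100 ∧ pA.1 < 100 then requests
        else
          let requests := requests + pA.2 * pB.2
          if pA.1 = pB.1 then requests - pA.2 else requests) requests
      = requests + ((PySem.List.enumerate cnt 0).map (fun pB =>
          if 2 * pB.1 ≤ pA.1 + 14 then 0
          else if pB.1 > pA.1 then 0
          else if pB.1 > 100 ∧ pA.1 < 100 then 0
          else pA.2 * pB.2 - (if pA.1 = pB.1 then pA.2 else 0))).sum := by
    intro pA requests
    rw [← PySem.List.foldl_add]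
    apply PySem.List.foldl_congr_mem
    intro acc pB _
    split_ifs <;> ring
  have hmem : ∀ pA ∈ PySem.List.enumerate cnt 0, 0 ≤ pA.1 ∧ pA.1 < 121 := by
    intro pA hpA
    have h1 : pA.1 ∈ (PySem.List.enumerate cnt 0).map (·.1) := List.mem_map_of_mem hpA
    rw [PySem.List.map_fst_enumerate, h] at h1
    have := PySem.List.mem_pyRange_one.mp h1
    omega
  have hinner : ∀ pA ∈ PySem.List.enumerate cnt 0,
      ((PySem.List.enumerate cnt 0).map (fun pB =>
          if 2 * pB.1 ≤ pA.1 + 14 then 0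
          else if pB.1 > pA.1 then 0
          else if pB.1 > 100 ∧ pA.1 < 100 then 0
          else pA.2 * pB.2 - (if pA.1 = pB.1 then pA.2 else 0))).sum
      = pvG cnt pA.1 pA.2 := by
    intro pA hpA
    obtain ⟨hA0, hA1⟩ := hmem pA hpA
    by_cases hA : 15 ≤ pA.1
    · have hfd : PySem.Int.floordiv (pA.1 + 14) 2 = (pA.1 + 14) / 2 :=
        PySem.Int.floordiv_eq_ediv_of_pos (by norm_num)
      have hpt : ∀ pB : Int × Int,
          (if 2 * pB.1 ≤ pA.1 + 14 then (0:Int)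
           else if pB.1 > pA.1 then 0
           else if pB.1 > 100 ∧ pA.1 < 100 then 0
           else pA.2 * pB.2 - (if pA.1 = pB.1 then pA.2 else 0))
          = (if PySem.Int.floordiv (pA.1 + 14) 2 + 1 ≤ pB.1 ∧ pB.1 ≤ pA.1 then pB.2 else 0) * pA.2
            - (if pB.1 = pA.1 then pA.2 else 0) := by
        intro pB
        split_ifs <;> first | (exfalso; omega) | ring1 | omega
      rw [List.map_congr_left (fun pB _ => hpt pB)]
      rw [pv_sum_map_sub, List.sum_map_mul_right, pv_enum_interval_sum cnt 0 _ _ (by omega),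
        pv_enum_point_sum cnt pA.2 0 pA.1]
      rw [if_pos (by rw [h]; push_cast; omega)]
      rw [pvG, if_pos hA]
      simp only [sub_zero, pvS]
      ring
    · have hz : ∀ pB ∈ PySem.List.enumerate cnt 0,
          (if 2 * pB.1 ≤ pA.1 + 14 then (0:Int)
           else if pB.1 > pA.1 then 0
           else if pB.1 > 100 ∧ pA.1 < 100 then 0
           else pA.2 * pB.2 - (if pA.1 = pB.1 then pA.2 else 0)) = 0 := by
        intro pB _
        split_ifs <;> first | rfl | (exfalso; omega)
      rw [List.map_congr_left hz]
      rw [pvG, if_neg hA]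
      simp
  rw [PySem.List.foldl_congr_mem (PySem.List.enumerate cnt 0) _
        (fun requests pA => requests + ((PySem.List.enumerate cnt 0).map (fun pB =>
          if 2 * pB.1 ≤ pA.1 + 14 then 0
          else if pB.1 > pA.1 then 0
          else if pB.1 > 100 ∧ pA.1 < 100 then 0
          else pA.2 * pB.2 - (if pA.1 = pB.1 then pA.2 else 0))).sum) 0
        (fun acc pA _ => hbody pA acc)]
  rw [PySem.List.foldl_add, zero_add, List.map_congr_left hinner]
  rw [pv_enum_sum_eq_range (pvG cnt) cnt 0, h]
  norm_num

lemma pv_B_loop (cnt : List Int) (h : cnt.length = 121) :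
    (PySem.List.pyRange 15 121 1).foldl (fun total a =>
      if PySem.List.pyGetD cnt a 0 ≠ 0 then
        total + PySem.List.pyGetD cnt a 0 *
          ((PySem.List.pyGetD (pvPrefixRun cnt).2 (a + 1) 0
            - PySem.List.pyGetD (pvPrefixRun cnt).2 (PySem.Int.floordiv (a + 14) 2 + 1) 0) - 1)
      else total) 0
    = ((PySem.List.pyRange 15 121 1).map
        (fun a => pvG cnt a (PySem.List.pyGetD cnt a 0))).sum := by
  have hcong : ∀ (total : Int), ∀ a ∈ PySem.List.pyRange 15 121 1,
      (if PySem.List.pyGetD cnt a 0 ≠ 0 then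
        total + PySem.List.pyGetD cnt a 0 *
          ((PySem.List.pyGetD (pvPrefixRun cnt).2 (a + 1) 0
            - PySem.List.pyGetD (pvPrefixRun cnt).2 (PySem.Int.floordiv (a + 14) 2 + 1) 0) - 1)
      else total)
      = total + pvG cnt a (PySem.List.pyGetD cnt a 0) := by
    intro total a ha
    obtain ⟨ha1, ha2⟩ := PySem.List.mem_pyRange_one.mp ha
    have hfd : PySem.Int.floordiv (a + 14) 2 = (a + 14) / 2 :=
      PySem.Int.floordiv_eq_ediv_of_pos (by norm_num)
    rw [pv_prefix_getD cnt h (a + 1) (by omega) (by omega),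
        pv_prefix_getD cnt h (PySem.Int.floordiv (a + 14) 2 + 1) (by omega) (by omega)]
    rw [pvG, if_pos ha1]
    by_cases hc : PySem.List.pyGetD cnt a 0 ≠ 0
    · rw [if_pos hc]
    · rw [if_neg hc]
      push_neg at hc
      rw [hc]
      ring
  rw [PySem.List.foldl_congr_mem _ _
        (fun total a => total + pvG cnt a (PySem.List.pyGetD cnt a 0)) 0
        (fun total a ha => hcong total a ha)]
  rw [PySem.List.foldl_add, zero_add]

-- ===== VERDICT (by name: the statement is the Claim_ definition above) =====
theorem friends_of_ages_spec : Claim_equal_friends_of_ages := by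
  intro ages _ _
  unfold Spec_friends_of_ages
  show friends_of_ages ages = friends_of_ages_alt ages
  unfold friends_of_ages friends_of_ages_alt
  rw [pv_A_loop (pvCount ages) (pv_count_length ages),
      pv_B_loop (pvCount ages) (pv_count_length ages)]
  rw [PySem.List.pyRange_one_append 0 15 121 (by norm_num) (by norm_num),
      List.map_append, List.sum_append]
  have h0 : ((PySem.List.pyRange 0 15 1).map
      (fun a => pvG (pvCount ages) a (PySem.List.pyGetD (pvCount ages) a 0))).sum = 0 := by
    apply List.sum_eq_zero
    intro x hx
    obtain ⟨a, ha, rfl⟩ := List.mem_map.mp hx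
    obtain ⟨ha1, ha2⟩ := PySem.List.mem_pyRange_one.mp ha
    rw [pvG, if_neg (by omega)]
  rw [h0, zero_add]
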